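-- pv_equiv track=rewrite | github.com/Kabilan21052004/Ap_Assignment | 14.py | equivalent
-- ===== SOURCE A (Python) =====
-- def equivalent(str1, str2):
--     def is_rotation(s1, s2):
--         if len(s1) != len(s2):
--             return False
--         return s1 in (s2 + s2)
--
--     longest_substring = ""
--     for i in range(len(str1)):
--         for j in range(i, len(str1)):
--             sub1 = str1[i:j + 1]
--             for k in range(len(str2)):
--                 for l in range(k, len(str2)):
--                     sub2 = str2[k:l + 1]
--                     if is_rotation(sub1, sub2):
--                         if len(sub1) > len(longest_substring):
--                             longest_substring = sub1
--                         elif len(sub1) == len(longest_substring) and sub1 < longest_substring: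
--                             longest_substring = sub1
--
--     return longest_substring
-- ===== SOURCE B (Python) =====
-- def equivalent(str1, str2):
--     n = len(str1)
--     for L in range(n, 0, -1):
--         best = None
--         for i in range(n - L + 1):
--             s = str1[i:i + L]
--             if (best is None or s < best) and any((s + s)[r:r + L] in str2 for r in range(L)):
--                 best = s
--         if best is not None:
--             return best
--     return ""
-- ===== Notes on version B (the rewrite author's own statement) =====
-- stated objective: faster
-- what changed: B drops A's O(m^2) enumeration of str2's substrings entirely: it scans str1's substrings by decreasing length, tests each of the L rotations of a candidate directly for occurrence in str2, keeps the lexicographic minimum at that length, and returns at the first length with a hit.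
import Mathlib
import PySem

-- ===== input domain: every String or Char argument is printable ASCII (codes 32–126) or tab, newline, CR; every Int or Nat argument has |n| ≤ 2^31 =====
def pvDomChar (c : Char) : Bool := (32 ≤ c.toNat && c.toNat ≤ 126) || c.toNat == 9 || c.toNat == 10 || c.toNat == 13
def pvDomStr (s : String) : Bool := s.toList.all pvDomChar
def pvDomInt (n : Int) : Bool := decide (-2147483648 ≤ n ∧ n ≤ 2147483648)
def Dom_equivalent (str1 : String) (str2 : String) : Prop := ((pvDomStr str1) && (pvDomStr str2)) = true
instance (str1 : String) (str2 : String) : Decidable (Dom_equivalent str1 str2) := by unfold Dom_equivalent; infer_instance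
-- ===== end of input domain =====

-- B replaces A's four nested substring loops (every substring pair tested for rotation) by a
-- descending-length scan of str1's substrings that tests each rotation directly against str2;
-- measurably faster (asymptotic: the O(m^2) scan over str2's substrings disappears).

-- ===== PORT A =====
-- A's inner helper is_rotation
def pvIsRotation (s1 s2 : List Char) : Bool :=
  if s1.length ≠ s2.length then false
  else PySem.Chars.isIn s1 (s2 ++ s2)

-- A's update of longest_substring (the if/elif chain in the loop body)
def pvUpdA (best sub1 : List Char) : List Char :=
  if sub1.length > best.length then sub1
  else if sub1.length = best.length ∧ sub1 < best then sub1
  else best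

def equivalentCore (cs1 cs2 : List Char) : List Char :=
  (PySem.List.pyRange 0 (cs1.length : Int) 1).foldl (fun best i =>
    (PySem.List.pyRange i (cs1.length : Int) 1).foldl (fun best j =>
      let sub1 := PySem.List.slice cs1 (some i) (some (j + 1))
      (PySem.List.pyRange 0 (cs2.length : Int) 1).foldl (fun best k =>
        (PySem.List.pyRange k (cs2.length : Int) 1).foldl (fun best l =>
          let sub2 := PySem.List.slice cs2 (some k) (some (l + 1))
          if pvIsRotation sub1 sub2 then pvUpdA best sub1 else best) best) best) best) []

def equivalent (str1 : String) (str2 : String) : String :=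
  String.ofList (equivalentCore str1.toList str2.toList)

-- ===== PORT B =====
-- any((s+s)[r:r+L] in str2 for r in range(L))  with L = len(s)
def pvRotHit (s cs2 : List Char) : Bool :=
  (PySem.List.pyRange 0 (s.length : Int) 1).any (fun r =>
    PySem.Chars.isIn (PySem.List.slice (s ++ s) (some r) (some (r + (s.length : Int)))) cs2)

-- the body of B's loop over i at one length L (best is None / the current minimum)
def pvBestAt (cs1 cs2 : List Char) (L : Int) : Option (List Char) :=
  (PySem.List.pyRange 0 ((cs1.length : Int) - L + 1) 1).foldl
    (fun best i =>
      let s := PySem.List.slice cs1 (some i) (some (i + L))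
      if (match best with | none => true | some b => decide (s < b)) && pvRotHit s cs2 then
        some s
      else best)
    none

def equivalentAltCore (cs1 cs2 : List Char) : List Char :=
  match (PySem.List.pyRange (cs1.length : Int) 0 (-1)).foldl
      (fun acc L => match acc with
        | some r => some r            -- the Python already returned
        | none => pvBestAt cs1 cs2 L) none with
  | some r => r
  | none => []

def equivalent_alt (str1 : String) (str2 : String) : String :=
  String.ofList (equivalentAltCore str1.toList str2.toList)

-- ===== PRECONDITION & SPEC =====
def Spec_equivalent (str1 : String) (str2 : String) (out : String) : Prop := out = equivalent_alt str1 str2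
instance (str1 : String) (str2 : String) (out : String) : Decidable (Spec_equivalent str1 str2 out) := by unfold Spec_equivalent; infer_instance

-- ===== CLAIM (what is proved, stated in full; the proofs are below) =====
def Claim_equal_equivalent : Prop := ∀ (str1 : String) (str2 : String), Dom_equivalent str1 str2 → Spec_equivalent str1 str2 (equivalent str1 str2)

-- ===== LEMMAS AND PROOFS =====

-- "s has a rotation occurring in cs2"
def pvQual (cs2 s : List Char) : Prop := ∃ r : Nat, r < s.length ∧ (s.drop r ++ s.take r) <:+: cs2

-- "r is at least as good a best as s": longer, or same length and lexicographically ≤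
def pvGe (r s : List Char) : Prop := s.length < r.length ∨ (r.length = s.length ∧ r ≤ s)

theorem pvGe_refl (r : List Char) : pvGe r r := Or.inr ⟨rfl, le_refl r⟩

theorem pvGe_trans {a b c : List Char} (h1 : pvGe a b) (h2 : pvGe b c) : pvGe a c := by
  rcases h1 with h1 | ⟨h1, h1'⟩ <;> rcases h2 with h2 | ⟨h2, h2'⟩
  · exact Or.inl (by omega)
  · exact Or.inl (by omega)
  · exact Or.inl (by omega)
  · exact Or.inr ⟨by omega, le_trans h1' h2'⟩

theorem pvGe_antisymm {a b : List Char} (h1 : pvGe a b) (h2 : pvGe b a) : a = b := by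
  rcases h1 with h1 | ⟨h1, h1'⟩ <;> rcases h2 with h2 | ⟨h2, h2'⟩ <;> try omega
  exact le_antisymm h1' h2'

theorem pvUpdA_cases (b s : List Char) : pvUpdA b s = s ∨ pvUpdA b s = b := by
  unfold pvUpdA; split_ifs <;> simp

theorem pvGe_updA_left (b s : List Char) : pvGe (pvUpdA b s) b := by
  unfold pvUpdA; split_ifs with h1 h2
  · exact Or.inl h1
  · exact Or.inr ⟨h2.1, le_of_lt h2.2⟩
  · exact pvGe_refl b

theorem pvGe_updA_right (b s : List Char) : pvGe (pvUpdA b s) s := by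
  unfold pvUpdA; split_ifs with h1 h2
  · exact pvGe_refl s
  · exact pvGe_refl s
  · rcases Nat.lt_or_ge s.length b.length with h | h
    · exact Or.inl h
    · have hl : s.length = b.length := by omega
      refine Or.inr ⟨hl.symm, ?_⟩
      by_contra hbs
      exact h2 ⟨hl, lt_of_not_ge hbs⟩

theorem pvUpdA_of_ge {b s : List Char} (h : pvGe b s) : pvUpdA b s = b := by
  unfold pvUpdA; split_ifs with h1 h2
  · rcases h with h | ⟨h, _⟩ <;> omega
  · rcases h with h | ⟨h, hle⟩
    · omega
    · exact absurd (lt_of_lt_of_le h2.2 hle) (lt_irrefl s)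
  · rfl

theorem pvUpdA_idem (b s : List Char) : pvUpdA (pvUpdA b s) s = pvUpdA b s :=
  pvUpdA_of_ge (pvGe_updA_right b s)

-- collapsing a fold that conditionally applies an idempotent update
theorem foldl_cond_idem {α β : Type} (u : β → β) (hu : ∀ b, u (u b) = u b)
    (p : α → Bool) (xs : List α) (b : β) :
    xs.foldl (fun b x => if p x then u b else b) b = if xs.any p then u b else b := by
  induction xs generalizing b with
  | nil => simp
  | cons x t ih =>
    simp only [List.foldl_cons, List.any_cons]
    by_cases hx : p x = true
    · simp [hx, ih, hu]
    · simp [hx, ih]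



-- infix decomposition
theorem pvInfix_decomp {s cs : List Char} (h : s <:+: cs) :
    ∃ a : Nat, a + s.length ≤ cs.length ∧ s = (cs.drop a).take s.length := by
  obtain ⟨p, q, hpq⟩ := h
  refine ⟨p.length, ?_, ?_⟩
  · have := congrArg List.length hpq
    simp at this; omega
  · have h1 : cs.drop p.length = s ++ q := by
      rw [← hpq, List.append_assoc, List.drop_left]
    rw [h1, List.take_left]

theorem pvTakeDrop_infix (cs : List Char) (a L : Nat) (h : a + L ≤ cs.length) :
    ((cs.drop a).take L).length = L ∧ (cs.drop a).take L <:+: cs := by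
  constructor
  · simp; omega
  · exact (List.take_prefix _ _).isInfix.trans (List.drop_suffix a cs).isInfix

-- rotation of the doubled string
theorem pvRotSlice (s : List Char) (r : Nat) (hr : r ≤ s.length) :
    ((s ++ s).drop r).take s.length = s.drop r ++ s.take r := by
  have h1 : r - s.length = 0 := by omega
  rw [List.drop_append, h1, List.drop_zero, List.take_append]
  rw [List.take_of_length_le (by simp)]
  have h3 : s.length - (s.drop r).length = r := by simp; omega
  rw [h3]

theorem pvRot_of_infix_double {s t : List Char} (hne : s ≠ []) (hlen : s.length = t.length)
    (h : s <:+: t ++ t) : ∃ r : Nat, r < s.length ∧ s.drop r ++ s.take r = t := by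
  obtain ⟨a, ha, hs⟩ := pvInfix_decomp h
  have hlen2 : (t ++ t).length = 2 * t.length := by simp; omega
  have ha' : a ≤ t.length := by simp at ha; omega
  have hs2 : s = t.drop a ++ t.take a := by
    rw [hs, hlen, pvRotSlice t a ha']
  by_cases h0 : a = 0
  · subst h0
    simp at hs2
    exact ⟨0, by simp [List.length_pos_iff.mpr hne], by simpa using hs2⟩
  · refine ⟨t.length - a, by omega, ?_⟩
    have hdl : (t.drop a).length = t.length - a := by simp
    rw [hs2]
    rw [show t.length - a = (t.drop a).length from hdl.symm]
    rw [List.drop_left, List.take_left]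
    exact List.take_append_drop a t

theorem pvInfix_double_of_rot (s : List Char) (r : Nat) :
    s <:+: (s.drop r ++ s.take r) ++ (s.drop r ++ s.take r) := by
  refine ⟨s.drop r, s.take r, ?_⟩
  nth_rewrite 2 [← List.take_append_drop r s]
  simp only [List.append_assoc]

-- the (k,l)/(i,j) double loops enumerate exactly the nonempty contiguous substrings
theorem pvMemSlices_iff (cs t : List Char) :
    (∃ k l : Int, k ∈ PySem.List.pyRange 0 (cs.length : Int) 1 ∧
        l ∈ PySem.List.pyRange k (cs.length : Int) 1 ∧
        t = PySem.List.slice cs (some k) (some (l + 1))) ↔ t ≠ [] ∧ t <:+: cs := by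
  constructor
  · rintro ⟨k, l, hk, hl, ht⟩
    rw [PySem.List.mem_pyRange_one] at hk hl
    rw [PySem.List.slice_toNat cs hk.1 (by omega)] at ht
    have hb : (l + 1).toNat ≤ cs.length := by omega
    have hab : k.toNat < (l + 1).toNat := by omega
    obtain ⟨hlen, hinf⟩ := pvTakeDrop_infix cs k.toNat ((l + 1).toNat - k.toNat) (by omega)
    refine ⟨?_, ht ▸ hinf⟩
    intro hnil
    rw [ht] at hnil
    have := congrArg List.length hnil
    rw [hlen] at this
    simp at this
    omega
  · rintro ⟨hne, hinf⟩
    obtain ⟨a, ha, hs⟩ := pvInfix_decomp hinf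
    have hpos : 0 < t.length := List.length_pos_iff.mpr hne
    refine ⟨(a : Int), ((a + t.length - 1 : Nat) : Int), ?_, ?_, ?_⟩
    · rw [PySem.List.mem_pyRange_one]
      constructor
      · exact Int.natCast_nonneg a
      · exact_mod_cast by omega
    · rw [PySem.List.mem_pyRange_one]
      constructor
      · exact_mod_cast by omega
      · exact_mod_cast by omega
    · have hc : ((a + t.length - 1 : Nat) : Int) + 1 = ((a + t.length : Nat) : Int) := by
        push_cast
        omega
      rw [hc, PySem.List.slice_natCast]
      have : a + t.length - a = t.length := by omega
      rw [this]
      exact hs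

theorem pvIsRotation_iff (s t : List Char) :
    pvIsRotation s t = true ↔ s.length = t.length ∧ s <:+: t ++ t := by
  unfold pvIsRotation
  split_ifs with h
  · simp [h]
  · rw [PySem.Chars.isIn_iff_infix]
    simp at h
    simp [h]

-- A's rotation test over all substrings of cs2, as one Bool (the collapsed inner loops)
def pvAQ (cs2 s : List Char) : Bool :=
  (PySem.List.pyRange 0 (cs2.length : Int) 1).any (fun k =>
    (PySem.List.pyRange k (cs2.length : Int) 1).any (fun l =>
      pvIsRotation s (PySem.List.slice cs2 (some k) (some (l + 1)))))

theorem pvAQ_iff {s : List Char} (cs2 : List Char) (hne : s ≠ []) :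
    pvAQ cs2 s = true ↔ pvQual cs2 s := by
  unfold pvAQ
  simp only [List.any_eq_true]
  constructor
  · rintro ⟨k, hk, l, hl, hrot⟩
    rw [pvIsRotation_iff] at hrot
    obtain ⟨hwne, hwinf⟩ := (pvMemSlices_iff cs2 _).mp ⟨k, l, hk, hl, rfl⟩
    obtain ⟨r, hr, hreq⟩ := pvRot_of_infix_double hne hrot.1 hrot.2
    exact ⟨r, hr, hreq ▸ hwinf⟩
  · rintro ⟨r, hr, hinf⟩
    obtain ⟨k, l, hk, hl, heq⟩ := (pvMemSlices_iff cs2 (s.drop r ++ s.take r)).mpr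
      ⟨by
        intro hnil
        have := congrArg List.length hnil
        simp at this
        omega, hinf⟩
    refine ⟨k, hk, l, hl, ?_⟩
    rw [← heq, pvIsRotation_iff]
    constructor
    · simp
      omega
    · exact pvInfix_double_of_rot s r

theorem pvRotHit_iff (s cs2 : List Char) : pvRotHit s cs2 = true ↔ pvQual cs2 s := by
  unfold pvRotHit
  simp only [List.any_eq_true]
  constructor
  · rintro ⟨r, hrmem, hin⟩
    rw [PySem.List.mem_pyRange_one] at hrmem
    rw [PySem.List.slice_toNat _ hrmem.1 (by omega)] at hin
    have h1 : (r + (s.length : Int)).toNat - r.toNat = s.length := by omega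
    rw [h1, pvRotSlice s r.toNat (by omega)] at hin
    rw [PySem.Chars.isIn_iff_infix] at hin
    exact ⟨r.toNat, by omega, hin⟩
  · rintro ⟨r, hr, hinf⟩
    refine ⟨(r : Int), ?_, ?_⟩
    · rw [PySem.List.mem_pyRange_one]
      constructor
      · exact Int.natCast_nonneg r
      · exact_mod_cast hr
    · rw [PySem.List.slice_toNat _ (Int.natCast_nonneg r) (by positivity)]
      have h1 : ((r : Int) + (s.length : Int)).toNat - (r : Int).toNat = s.length := by omega
      rw [h1, Int.toNat_natCast, pvRotSlice s r (by omega)]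
      rw [PySem.Chars.isIn_iff_infix]
      exact hinf

-- === A side: the fold computes the best (longest, then lexicographically least) qualifying element ===

theorem pvFoldlBest_spec (p : List Char → Bool) :
    ∀ (xs : List (List Char)) (b : List Char),
      (xs.foldl (fun b s => if p s then pvUpdA b s else b) b = b ∨
        (xs.foldl (fun b s => if p s then pvUpdA b s else b) b ∈ xs ∧
          p (xs.foldl (fun b s => if p s then pvUpdA b s else b) b) = true)) ∧
      pvGe (xs.foldl (fun b s => if p s then pvUpdA b s else b) b) b ∧
      (∀ s ∈ xs, p s = true → pvGe (xs.foldl (fun b s => if p s then pvUpdA b s else b) b) s)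
  | [], b => by simp [pvGe_refl]
  | x :: t, b => by
    simp only [List.foldl_cons]
    obtain ⟨ih1, ih2, ih3⟩ := pvFoldlBest_spec p t (if p x then pvUpdA b x else b)
    have hgb : pvGe (if p x then pvUpdA b x else b) b := by
      split_ifs
      · exact pvGe_updA_left b x
      · exact pvGe_refl b
    have hgx : p x = true → pvGe (if p x then pvUpdA b x else b) x := by
      intro hp
      rw [if_pos hp]
      exact pvGe_updA_right b x
    refine ⟨?_, pvGe_trans ih2 hgb, ?_⟩
    · rcases ih1 with h | ⟨hmem, hp⟩
      · rw [h]
        by_cases hp : p x = true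
        · rw [if_pos hp]
          rcases pvUpdA_cases b x with hc | hc
          · rw [hc]
            exact Or.inr ⟨by simp, hp⟩
          · rw [hc]
            exact Or.inl rfl
        · rw [if_neg hp]
          exact Or.inl rfl
      · exact Or.inr ⟨List.mem_cons_of_mem x hmem, hp⟩
    · intro s hs hp
      rcases List.mem_cons.mp hs with rfl | hs
      · exact pvGe_trans ih2 (hgx hp)
      · exact ih3 s hs hp

-- A's candidate list: all (i, j) substrings of cs1
def pvCL (cs1 : List Char) : List (List Char) :=
  (PySem.List.pyRange 0 (cs1.length : Int) 1).flatMap (fun i =>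
    (PySem.List.pyRange i (cs1.length : Int) 1).map (fun j =>
      PySem.List.slice cs1 (some i) (some (j + 1))))

theorem pvMemCL (cs1 s : List Char) : s ∈ pvCL cs1 ↔ (s ≠ [] ∧ s <:+: cs1) := by
  unfold pvCL
  simp only [List.mem_flatMap, List.mem_map]
  rw [← pvMemSlices_iff cs1 s]
  constructor
  · rintro ⟨i, hi, j, hj, heq⟩
    exact ⟨i, j, hi, hj, heq.symm⟩
  · rintro ⟨k, l, hk, hl, ht⟩
    exact ⟨k, hk, l, hl, ht.symm⟩

theorem pvInnerCollapse (cs2 sub1 : List Char) (b : List Char) :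
    (PySem.List.pyRange 0 (cs2.length : Int) 1).foldl (fun best k =>
      (PySem.List.pyRange k (cs2.length : Int) 1).foldl (fun best l =>
        let sub2 := PySem.List.slice cs2 (some k) (some (l + 1))
        if pvIsRotation sub1 sub2 then pvUpdA best sub1 else best) best) b
    = if pvAQ cs2 sub1 then pvUpdA b sub1 else b := by
  have hstep : (fun (best : List Char) (k : Int) =>
      (PySem.List.pyRange k (cs2.length : Int) 1).foldl (fun best l =>
        let sub2 := PySem.List.slice cs2 (some k) (some (l + 1))
        if pvIsRotation sub1 sub2 then pvUpdA best sub1 else best) best)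
      = fun best k => if (PySem.List.pyRange k (cs2.length : Int) 1).any (fun l =>
          pvIsRotation sub1 (PySem.List.slice cs2 (some k) (some (l + 1)))) then
            pvUpdA best sub1 else best := by
    funext best k
    exact foldl_cond_idem (fun b => pvUpdA b sub1) (fun b => pvUpdA_idem b sub1) _ _ best
  rw [hstep, foldl_cond_idem (fun b => pvUpdA b sub1) (fun b => pvUpdA_idem b sub1)]
  rfl

theorem pvCore_eq_fold (cs1 cs2 : List Char) :
    equivalentCore cs1 cs2 =
      (pvCL cs1).foldl (fun b s => if pvAQ cs2 s then pvUpdA b s else b) [] := by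
  unfold equivalentCore pvCL
  rw [List.foldl_flatMap]
  congr 1
  funext b i
  rw [List.foldl_map]
  congr 1
  funext b j
  exact pvInnerCollapse cs2 (PySem.List.slice cs1 (some i) (some (j + 1))) b

theorem pvA_spec (cs1 cs2 : List Char) :
    (equivalentCore cs1 cs2 = [] ∨
      (equivalentCore cs1 cs2 ≠ [] ∧ equivalentCore cs1 cs2 <:+: cs1 ∧
        pvQual cs2 (equivalentCore cs1 cs2))) ∧
    ∀ s, s ≠ [] → s <:+: cs1 → pvQual cs2 s → pvGe (equivalentCore cs1 cs2) s := by
  rw [pvCore_eq_fold]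
  obtain ⟨h1, _, h3⟩ := pvFoldlBest_spec (pvAQ cs2) (pvCL cs1) []
  constructor
  · rcases h1 with h | ⟨hmem, hp⟩
    · exact Or.inl h
    · obtain ⟨hne, hinf⟩ := (pvMemCL _ _).mp hmem
      exact Or.inr ⟨hne, hinf, (pvAQ_iff cs2 hne).mp hp⟩
  · intro s hne hinf hq
    exact h3 s ((pvMemCL _ _).mpr ⟨hne, hinf⟩) ((pvAQ_iff cs2 hne).mpr hq)

-- === B side: the Option fold computes the lexicographic minimum of the qualifying candidates ===

def pvMinStep (f : Int → List Char) (p : List Char → Bool)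
    (best : Option (List Char)) (i : Int) : Option (List Char) :=
  if (match best with | none => true | some b => decide (f i < b)) && p (f i) then some (f i)
  else best

theorem pvFoldlMin_spec (f : Int → List Char) (p : List Char → Bool) :
    ∀ (xs : List Int) (acc : Option (List Char)),
      (List.foldl (pvMinStep f p) acc xs = none →
        acc = none ∧ ∀ i ∈ xs, p (f i) = false) ∧
      (∀ b, List.foldl (pvMinStep f p) acc xs = some b →
        (acc = some b ∨ (b ∈ xs.map f ∧ p b = true)) ∧
        (∀ a, acc = some a → b ≤ a) ∧
        (∀ i ∈ xs, p (f i) = true → b ≤ f i))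
  | [], acc => by
    constructor
    · intro h
      exact ⟨h, by simp⟩
    · intro b h
      simp only [List.foldl_nil] at h
      refine ⟨Or.inl h, ?_, by simp⟩
      intro a ha
      rw [ha] at h
      injection h with h
      exact le_of_eq h.symm
  | i :: t, acc => by
    simp only [List.foldl_cons]
    obtain ⟨ihn, ihs⟩ := pvFoldlMin_spec f p t (pvMinStep f p acc i)
    have hcase : (pvMinStep f p acc i = some (f i) ∧ p (f i) = true ∧
          (∀ a, acc = some a → f i < a)) ∨
        (pvMinStep f p acc i = acc ∧ (p (f i) = true → ∃ a, acc = some a ∧ a ≤ f i)) := by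
      unfold pvMinStep
      cases acc with
      | none =>
        by_cases hp : p (f i) = true
        · exact Or.inl ⟨by simp [hp], hp, by intro a ha; cases ha⟩
        · refine Or.inr ⟨by simp [hp], ?_⟩
          intro hp'
          exact absurd hp' hp
      | some a =>
        by_cases hlt : f i < a
        · by_cases hp : p (f i) = true
          · refine Or.inl ⟨by simp [hp, hlt], hp, ?_⟩
            rintro a' ha'
            injection ha' with ha'
            rw [← ha']
            exact hlt
          · refine Or.inr ⟨by simp [hp], ?_⟩
            intro hp'
            exact absurd hp' hp
        · refine Or.inr ⟨by simp [hlt], ?_⟩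
          intro _
          exact ⟨a, rfl, not_lt.mp hlt⟩
    constructor
    · intro hnone
      obtain ⟨hacc', hall⟩ := ihn hnone
      rcases hcase with ⟨heq, _, _⟩ | ⟨heq, himp⟩
      · rw [heq] at hacc'
        cases hacc'
      · rw [heq] at hacc'
        refine ⟨hacc', ?_⟩
        intro j hj
        rcases List.mem_cons.mp hj with rfl | hj
        · cases hb : p (f j) with
          | false => rfl
          | true =>
            obtain ⟨a, ha, _⟩ := himp hb
            rw [hacc'] at ha
            cases ha
        · exact hall j hj
    · intro b hsome
      obtain ⟨ih1, ih2, ih3⟩ := ihs b hsome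
      rcases hcase with ⟨heq, hp, hlt⟩ | ⟨heq, himp⟩
      · have hble : b ≤ f i := ih2 (f i) heq
        refine ⟨?_, ?_, ?_⟩
        · rcases ih1 with h | ⟨hmem, hpb⟩
          · rw [heq] at h
            injection h with h
            rw [← h]
            exact Or.inr ⟨by simp, hp⟩
          · refine Or.inr ⟨?_, hpb⟩
            simp only [List.map_cons, List.mem_cons]
            exact Or.inr hmem
        · intro a ha
          exact le_trans hble (le_of_lt (hlt a ha))
        · intro j hj hpj
          rcases List.mem_cons.mp hj with rfl | hj
          · exact hble
          · exact ih3 j hj hpj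
      · rw [heq] at ih1 ih2
        refine ⟨?_, ih2, ?_⟩
        · rcases ih1 with h | ⟨hmem, hpb⟩
          · exact Or.inl h
          · refine Or.inr ⟨?_, hpb⟩
            simp only [List.map_cons, List.mem_cons]
            exact Or.inr hmem
        · intro j hj hpj
          rcases List.mem_cons.mp hj with rfl | hj
          · obtain ⟨a, ha, halt⟩ := himp hpj
            exact le_trans (ih2 a ha) halt
          · exact ih3 j hj hpj

theorem pvFoldlSkip (g : Int → Option (List Char)) (xs : List Int) (b : List Char) :
    xs.foldl (fun acc L => match acc with | some r => some r | none => g L) (some b) = some b := by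
  induction xs with
  | nil => rfl
  | cons x t ih => simpa using ih

theorem pvBestAt_spec (cs1 cs2 : List Char) (Ln : Nat) (h1 : 1 ≤ Ln) (_h2 : Ln ≤ cs1.length) :
    (pvBestAt cs1 cs2 (Ln : Int) = none → ∀ s, s.length = Ln → s <:+: cs1 → ¬ pvQual cs2 s) ∧
    (∀ b, pvBestAt cs1 cs2 (Ln : Int) = some b →
      b.length = Ln ∧ b <:+: cs1 ∧ pvQual cs2 b ∧
      ∀ s, s.length = Ln → s <:+: cs1 → pvQual cs2 s → b ≤ s) := by
  have hBA : pvBestAt cs1 cs2 (Ln : Int) =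
      (PySem.List.pyRange 0 ((cs1.length : Int) - (Ln : Int) + 1) 1).foldl
        (pvMinStep (fun i => PySem.List.slice cs1 (some i) (some (i + (Ln : Int))))
          (fun s => pvRotHit s cs2)) none := rfl
  set f := fun i : Int => PySem.List.slice cs1 (some i) (some (i + (Ln : Int))) with hf
  have hfval : ∀ i : Int, 0 ≤ i → f i = (cs1.drop i.toNat).take Ln := by
    intro i hi
    rw [hf]
    simp only []
    rw [PySem.List.slice_toNat cs1 hi (by omega)]
    congr 1
    omega
  have hcand : ∀ i : Int, i ∈ PySem.List.pyRange 0 ((cs1.length : Int) - (Ln : Int) + 1) 1 →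
      (f i).length = Ln ∧ f i <:+: cs1 := by
    intro i hi
    rw [PySem.List.mem_pyRange_one] at hi
    rw [hfval i hi.1]
    exact pvTakeDrop_infix cs1 i.toNat Ln (by omega)
  have hcover : ∀ s : List Char, s.length = Ln → s <:+: cs1 →
      ∃ i ∈ PySem.List.pyRange 0 ((cs1.length : Int) - (Ln : Int) + 1) 1, f i = s := by
    intro s hsl hsi
    obtain ⟨a, ha, hs⟩ := pvInfix_decomp hsi
    refine ⟨(a : Int), ?_, ?_⟩
    · rw [PySem.List.mem_pyRange_one]
      constructor
      · exact Int.natCast_nonneg a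
      · omega
    · rw [hfval (a : Int) (Int.natCast_nonneg a), Int.toNat_natCast, ← hsl]
      exact hs.symm
  obtain ⟨specN, specS⟩ := pvFoldlMin_spec f (fun s => pvRotHit s cs2)
    (PySem.List.pyRange 0 ((cs1.length : Int) - (Ln : Int) + 1) 1) none
  constructor
  · intro hnone s hsl hsi hq
    obtain ⟨_, hall⟩ := specN (hBA ▸ hnone)
    obtain ⟨i, hi, hfi⟩ := hcover s hsl hsi
    have hfalse := hall i hi
    rw [hfi] at hfalse
    rw [← pvRotHit_iff s cs2] at hq
    rw [hq] at hfalse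
    cases hfalse
  · intro b hsome
    obtain ⟨hmem, _, hmin⟩ := specS b (hBA ▸ hsome)
    rcases hmem with h | ⟨hbm, hpb⟩
    · cases h
    · obtain ⟨i, hi, hfi⟩ := List.mem_map.mp hbm
      obtain ⟨hlen, hinf⟩ := hcand i hi
      rw [hfi] at hlen hinf
      refine ⟨hlen, hinf, (pvRotHit_iff b cs2).mp hpb, ?_⟩
      intro s hsl hsi hq
      obtain ⟨j, hj, hfj⟩ := hcover s hsl hsi
      have := hmin j hj (by rw [hfj]; exact (pvRotHit_iff s cs2).mpr hq)
      rw [hfj] at this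
      exact this

theorem pvOuter_spec (cs1 cs2 : List Char) :
    ∀ an : Nat, an ≤ cs1.length →
      ((PySem.List.pyRange (an : Int) 0 (-1)).foldl
          (fun acc L => match acc with | some r => some r | none => pvBestAt cs1 cs2 L) none = none →
        ∀ s, s ≠ [] → s.length ≤ an → s <:+: cs1 → ¬ pvQual cs2 s) ∧
      (∀ b, (PySem.List.pyRange (an : Int) 0 (-1)).foldl
          (fun acc L => match acc with | some r => some r | none => pvBestAt cs1 cs2 L) none = some b →
        b ≠ [] ∧ b <:+: cs1 ∧ pvQual cs2 b ∧
        ∀ s, s ≠ [] → s.length ≤ an → s <:+: cs1 → pvQual cs2 s → pvGe b s) := by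
  intro an
  induction an with
  | zero =>
    intro _
    rw [PySem.List.pyRange_neg_one_eq_nil (by norm_num)]
    simp only [List.foldl_nil]
    constructor
    · intro _ s hne hl _ _
      have := List.length_pos_iff.mpr hne
      omega
    · intro b h
      cases h
  | succ m ih =>
    intro hle
    obtain ⟨ihN, ihS⟩ := ih (by omega)
    have hcons : PySem.List.pyRange ((m + 1 : Nat) : Int) 0 (-1) =
        ((m + 1 : Nat) : Int) :: PySem.List.pyRange (((m + 1 : Nat) : Int) - 1) 0 (-1) :=
      PySem.List.pyRange_neg_one_cons (by exact_mod_cast Nat.succ_pos m)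
    have hcast : ((m + 1 : Nat) : Int) - 1 = ((m : Nat) : Int) := by push_cast; ring
    rw [hcons, hcast, List.foldl_cons]
    have hred : (match (none : Option (List Char)) with
        | some r => some r
        | none => pvBestAt cs1 cs2 ((m + 1 : Nat) : Int))
        = pvBestAt cs1 cs2 ((m + 1 : Nat) : Int) := rfl
    rw [hred]
    obtain ⟨bspecN, bspecS⟩ := pvBestAt_spec cs1 cs2 (m + 1) (by omega) hle
    cases hba : pvBestAt cs1 cs2 ((m + 1 : Nat) : Int) with
    | some b0 =>
      rw [pvFoldlSkip]
      constructor
      · intro h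
        cases h
      · intro b h
        injection h with h
        subst h
        obtain ⟨hbl, hbinf, hbq, hbmin⟩ := bspecS b0 hba
        refine ⟨by intro h; rw [h] at hbl; simp at hbl, hbinf, hbq, ?_⟩
        intro s hne hl hinf hq
        rcases Nat.lt_or_ge s.length (m + 1) with hlt | hge
        · exact Or.inl (by omega)
        · have hsl : s.length = m + 1 := by omega
          exact Or.inr ⟨by omega, hbmin s hsl hinf hq⟩
    | none =>
      constructor
      · intro h s hne hl hinf hq
        rcases Nat.lt_or_ge s.length (m + 1) with hlt | hge
        · exact ihN h s hne (by omega) hinf hq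
        · exact bspecN hba s (by omega) hinf hq
      · intro b h
        obtain ⟨hbne, hbinf, hbq, hbmin⟩ := ihS b h
        refine ⟨hbne, hbinf, hbq, ?_⟩
        intro s hne hl hinf hq
        rcases Nat.lt_or_ge s.length (m + 1) with hlt | hge
        · exact hbmin s hne (by omega) hinf hq
        · exact absurd hq (bspecN hba s (by omega) hinf)

theorem pvCore_eq (cs1 cs2 : List Char) : equivalentCore cs1 cs2 = equivalentAltCore cs1 cs2 := by
  obtain ⟨haP, haMin⟩ := pvA_spec cs1 cs2
  obtain ⟨hbN, hbS⟩ := pvOuter_spec cs1 cs2 cs1.length (le_refl _)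
  unfold equivalentAltCore
  cases hfold : (PySem.List.pyRange (cs1.length : Int) 0 (-1)).foldl
      (fun acc L => match acc with | some r => some r | none => pvBestAt cs1 cs2 L) none with
  | none =>
    have hnoq : ∀ s, s ≠ [] → s <:+: cs1 → ¬ pvQual cs2 s := fun s hne hinf =>
      hbN hfold s hne (List.IsInfix.length_le hinf) hinf
    rcases haP with h | ⟨hne, hinf, hq⟩
    · exact h
    · exact absurd hq (hnoq _ hne hinf)
  | some b =>
    obtain ⟨hbne, hbinf, hbq, hbmin⟩ := hbS b hfold
    rcases haP with h | ⟨hne, hinf, hq⟩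
    · exfalso
      have hge := haMin b hbne hbinf hbq
      rw [h] at hge
      have := List.length_pos_iff.mpr hbne
      rcases hge with hge | ⟨hge, _⟩
      · simp at hge
      · simp at hge
        omega
      
    · have h1 : pvGe (equivalentCore cs1 cs2) b := haMin b hbne hbinf hbq
      have h2 : pvGe b (equivalentCore cs1 cs2) :=
        hbmin (equivalentCore cs1 cs2) hne (List.IsInfix.length_le hinf) hinf hq
      exact pvGe_antisymm h1 h2


-- ===== VERDICT (by name: the statement is the Claim_ definition above) =====
theorem equivalent_spec : Claim_equal_equivalent := by
  intro str1 str2 _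
  unfold Spec_equivalent equivalent equivalent_alt
  rw [pvCore_eq]
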